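-- pv_equiv track=rewrite | github.com/ChanningLua/prax-agent | core/compaction.py | session_memory_compact
-- ===== SOURCE A (Python) =====
-- from typing import Any
--
-- SUMMARY_PREFIX = "[Summary] "
--
-- _KEEP_RECENT_MESSAGES = 5
--
-- def session_memory_compact(
--     messages: list[dict[str, Any]],
--     session_memory_summary: str,
--     last_summarized_id: str | None = None,
--     keep_recent: int = _KEEP_RECENT_MESSAGES,
-- ) -> list[dict[str, Any]]:
--     """Replace old messages with session memory summary.
--
--     If `last_summarized_id` is provided, messages after that ID are kept.
--     Otherwise, keep the most recent `keep_recent` messages.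
--     """
--     recent_messages: list[dict[str, Any]] = []
--
--     if last_summarized_id and last_summarized_id != "none":
--         found = False
--         for msg in messages:
--             if found:
--                 recent_messages.append(msg)
--             if msg.get("id") == last_summarized_id:
--                 found = True
--         if not found:
--             recent_messages = messages[-keep_recent:]
--     else:
--         recent_messages = messages[-keep_recent:]
--
--     if not recent_messages and messages:
--         recent_messages = messages[-1:]
--
--     summary_message: dict[str, Any] = {
--         "role": "user",
--         "content": f"{SUMMARY_PREFIX}{session_memory_summary}",
--     }
--
--     return [summary_message] + recent_messages
-- ===== SOURCE B (Python) =====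
-- SUMMARY_PREFIX = "[Summary] "
-- _KEEP_RECENT_MESSAGES = 5
--
-- def session_memory_compact(messages, session_memory_summary, last_summarized_id=None, keep_recent=_KEEP_RECENT_MESSAGES):
--     if last_summarized_id and last_summarized_id != "none":
--         idx = next((i for i, m in enumerate(messages) if m.get("id") == last_summarized_id), None)
--         recent_messages = messages[idx + 1:] if idx is not None else messages[-keep_recent:]
--     else:
--         recent_messages = messages[-keep_recent:]
--     if not recent_messages and messages:
--         recent_messages = messages[-1:]
--     return [{"role": "user", "content": SUMMARY_PREFIX + session_memory_summary}] + recent_messages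
-- ===== Notes on version B (the rewrite author's own statement) =====
-- stated objective: simpler
-- what changed: Replaces A's accumulate-while-scanning loop with flag-and-append state by a single first-index search followed by one tail slice (messages[idx+1:]), keeping the fallback slices unchanged.
import Mathlib
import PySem

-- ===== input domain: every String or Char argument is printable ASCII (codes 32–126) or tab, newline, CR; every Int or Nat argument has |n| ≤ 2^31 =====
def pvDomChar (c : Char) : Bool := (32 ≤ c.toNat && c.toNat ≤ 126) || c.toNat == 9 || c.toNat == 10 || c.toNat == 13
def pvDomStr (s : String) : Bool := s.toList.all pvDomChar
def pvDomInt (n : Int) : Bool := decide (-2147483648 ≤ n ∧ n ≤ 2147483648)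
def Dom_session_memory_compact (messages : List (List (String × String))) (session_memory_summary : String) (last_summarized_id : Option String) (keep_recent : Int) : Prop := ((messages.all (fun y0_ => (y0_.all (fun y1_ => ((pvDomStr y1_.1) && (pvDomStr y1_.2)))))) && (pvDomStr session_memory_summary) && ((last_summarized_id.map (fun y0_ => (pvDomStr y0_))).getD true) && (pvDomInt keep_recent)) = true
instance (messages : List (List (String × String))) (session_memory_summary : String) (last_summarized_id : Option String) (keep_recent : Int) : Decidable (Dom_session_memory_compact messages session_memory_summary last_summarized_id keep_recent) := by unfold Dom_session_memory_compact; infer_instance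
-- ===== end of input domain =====

-- B replaces A's accumulate-while-scanning loop (found flag + appends) by a first-index
-- search followed by one tail slice; same return value, simpler decomposition.


-- ===== PORT A =====
-- truthiness of `last_summarized_id and last_summarized_id != "none"`
def smcTruthy (last_summarized_id : Option String) : Bool :=
  match last_summarized_id with
  | some s => s != "" && s != "none"
  | none => false

-- A's loop: for msg in messages: if found: append; if msg.get("id") == lid: found = True
def smcStepA (lid : String) (st : Bool × List (List (String × String)))
    (msg : List (String × String)) : Bool × List (List (String × String)) :=
  let acc := if st.1 then st.2 ++ [msg] else st.2
  let found := if PySem.Dict.get? (PySem.Dict.mk msg) "id" == some lid then true else st.1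
  (found, acc)

def smcLoopA (lid : String) (messages : List (List (String × String))) :
    Bool × List (List (String × String)) :=
  messages.foldl (smcStepA lid) (false, [])

def session_memory_compact (messages : List (List (String × String))) (session_memory_summary : String) (last_summarized_id : Option String) (keep_recent : Int) : List (List (String × String)) :=
  let recent_messages :=
    if smcTruthy last_summarized_id then
      let lid := last_summarized_id.getD ""
      let st := smcLoopA lid messages
      if st.1 then st.2
      else PySem.List.slice messages (some (-keep_recent)) none
    else PySem.List.slice messages (some (-keep_recent)) none
  let recent_messages :=
    if recent_messages.isEmpty && !messages.isEmpty then
      PySem.List.slice messages (some (-1)) none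
    else recent_messages
  let summary_message : List (String × String) :=
    [("role", "user"), ("content", "[Summary] " ++ session_memory_summary)]
  [summary_message] ++ recent_messages

-- ===== PORT B =====
def session_memory_compact_alt (messages : List (List (String × String))) (session_memory_summary : String) (last_summarized_id : Option String) (keep_recent : Int) : List (List (String × String)) :=
  let recent_messages :=
    if smcTruthy last_summarized_id then
      let lid := last_summarized_id.getD ""
      match messages.findIdx? (fun m => PySem.Dict.get? (PySem.Dict.mk m) "id" == some lid) with
      | some i => messages.drop (i + 1)
      | none => PySem.List.slice messages (some (-keep_recent)) none
    else PySem.List.slice messages (some (-keep_recent)) none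
  let recent_messages :=
    if recent_messages.isEmpty && !messages.isEmpty then
      PySem.List.slice messages (some (-1)) none
    else recent_messages
  [[("role", "user"), ("content", "[Summary] " ++ session_memory_summary)]] ++ recent_messages

-- ===== PRECONDITION & SPEC =====
def Spec_session_memory_compact (messages : List (List (String × String))) (session_memory_summary : String) (last_summarized_id : Option String) (keep_recent : Int) (out : List (List (String × String))) : Prop := out = session_memory_compact_alt messages session_memory_summary last_summarized_id keep_recent
instance (messages : List (List (String × String))) (session_memory_summary : String) (last_summarized_id : Option String) (keep_recent : Int) (out : List (List (String × String))) : Decidable (Spec_session_memory_compact messages session_memory_summary last_summarized_id keep_recent out) := by unfold Spec_session_memory_compact; infer_instance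

-- ===== CLAIM (what is proved, stated in full; the proofs are below) =====
def Claim_equal_session_memory_compact : Prop := ∀ (messages : List (List (String × String))) (session_memory_summary : String) (last_summarized_id : Option String) (keep_recent : Int), Dom_session_memory_compact messages session_memory_summary last_summarized_id keep_recent → Spec_session_memory_compact messages session_memory_summary last_summarized_id keep_recent (session_memory_compact messages session_memory_summary last_summarized_id keep_recent)

-- ===== LEMMAS AND PROOFS =====

-- once found, A's loop just appends every remaining message
theorem smcLoopA_found (lid : String) (ms : List (List (String × String)))
    (acc : List (List (String × String))) :
    ms.foldl (smcStepA lid) (true, acc) = (true, acc ++ ms) := by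
  induction ms generalizing acc with
  | nil => simp
  | cons m ms ih =>
    rw [List.foldl_cons, show smcStepA lid (true, acc) m = (true, acc ++ [m]) by
      simp [smcStepA], ih]
    simp

-- A's loop computed from the first matching index
theorem smcLoopA_eq_findIdx? (lid : String) (ms : List (List (String × String))) :
    smcLoopA lid ms =
      match ms.findIdx? (fun m => PySem.Dict.get? (PySem.Dict.mk m) "id" == some lid) with
      | some i => (true, ms.drop (i + 1))
      | none => (false, []) := by
  unfold smcLoopA
  induction ms with
  | nil => simp
  | cons m ms ih =>
    rw [List.foldl_cons, List.findIdx?_cons]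
    by_cases h : (PySem.Dict.get? (PySem.Dict.mk m) "id" == some lid) = true
    · rw [show smcStepA lid (false, []) m = (true, []) by simp [smcStepA, h],
        smcLoopA_found]
      simp [h]
    · rw [show smcStepA lid (false, []) m = (false, []) by simp [smcStepA, h], ih]
      cases hf : ms.findIdx? (fun m => PySem.Dict.get? (PySem.Dict.mk m) "id" == some lid) <;>
        simp [h]

-- ===== VERDICT (by name: the statement is the Claim_ definition above) =====
theorem session_memory_compact_spec : Claim_equal_session_memory_compact := by
  intro messages session_memory_summary last_summarized_id keep_recent _
  unfold Spec_session_memory_compact session_memory_compact session_memory_compact_alt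
  simp only [smcLoopA_eq_findIdx?]
  cases hf : messages.findIdx?
      (fun m => PySem.Dict.get? (PySem.Dict.mk m) "id" == some (last_summarized_id.getD "")) <;>
    simp
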